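-- pv_equiv track=rewrite | github.com/Dyrran/hack_python_2 | hack_6.py | fn_hack_6
-- ===== SOURCE A (Python) =====
-- def fn_hack_6(s):
--     result = s
--     _lst = []
--
--     if len(result) > 0:
--         for index in range(len(result)):
--             if (index+1) % 2 != 0:
--                 _lst.append(str(index+1))
--             else:
--                 _lst.append("-")
--     else:
--         _lst.append("0")
--
--     result = _lst
--     return result
-- ===== SOURCE B (Python) =====
-- def fn_hack_6(s):
--     if not s:
--         return ["0"]
--     result = ["-"] * len(s)
--     for i in range(0, len(s), 2):
--         result[i] = str(i + 1)
--     return result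
-- ===== Notes on version B (the rewrite author's own statement) =====
-- stated objective: alternative
-- what changed: Replaces the single branching append loop over every index by an empty-guard, a one-shot default fill of dashes, and a stride-2 assignment pass that touches only the odd 1-based positions.
import Mathlib
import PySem

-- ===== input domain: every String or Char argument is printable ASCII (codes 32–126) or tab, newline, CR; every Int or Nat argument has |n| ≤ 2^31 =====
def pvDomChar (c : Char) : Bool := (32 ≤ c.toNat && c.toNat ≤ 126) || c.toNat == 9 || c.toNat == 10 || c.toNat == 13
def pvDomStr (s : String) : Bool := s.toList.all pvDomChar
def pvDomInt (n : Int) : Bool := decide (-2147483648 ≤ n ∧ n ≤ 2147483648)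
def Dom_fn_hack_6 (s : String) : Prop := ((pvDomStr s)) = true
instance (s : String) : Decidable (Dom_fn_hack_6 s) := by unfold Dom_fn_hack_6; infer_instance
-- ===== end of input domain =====

-- B replaces A's single branching append loop by an empty-guard, a one-shot dash fill
-- and a stride-2 overwrite pass over the odd 1-based positions (alternative decomposition, same cost).

-- ===== PORT A =====
def fn_hack_6 (s : String) : List String :=
  let result := s
  if PySem.Str.len result > 0 then
    (PySem.List.pyRange 0 (PySem.Str.len result) 1).foldl
      (fun lst index =>
        if PySem.Int.mod (index + 1) 2 ≠ 0 then lst ++ [PySem.Int.toStr (index + 1)]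
        else lst ++ ["-"]) []
  else ["0"]

-- ===== PORT B =====
def fn_hack_6_alt (s : String) : List String :=
  if PySem.Str.len s = 0 then ["0"]
  else
    (PySem.List.pyRange 0 (PySem.Str.len s) 2).foldl
      (fun res i => PySem.List.pySetD res i (PySem.Int.toStr (i + 1)))
      (PySem.List.pyRepeat ["-"] (PySem.Str.len s))

-- ===== PRECONDITION & SPEC =====
def Spec_fn_hack_6 (s : String) (out : List String) : Prop := out = fn_hack_6_alt s
instance (s : String) (out : List String) : Decidable (Spec_fn_hack_6 s out) := by unfold Spec_fn_hack_6; infer_instance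

-- ===== CLAIM (what is proved, stated in full; the proofs are below) =====
def Claim_equal_fn_hack_6 : Prop := ∀ (s : String), Dom_fn_hack_6 s → Spec_fn_hack_6 s (fn_hack_6 s)

-- ===== LEMMAS AND PROOFS =====

theorem pv_foldl_set_getElem? (g : Nat → String) (ks : List Nat) (init : List String) (j : Nat) :
    (ks.foldl (fun res k => res.set k (g k)) init)[j]? =
      if j ∈ ks then (if j < init.length then some (g j) else none) else init[j]? := by
  induction ks generalizing init with
  | nil => simp
  | cons k ks ih =>
    rw [List.foldl_cons, ih]
    by_cases hk : j = k
    · subst hk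
      simp [List.getElem?_set]
    · simp [hk, Ne.symm hk]

theorem pv_flatMap_singleton_map {α β : Type} (f : α → β) (l : List α) :
    l.flatMap (fun a => [f a]) = l.map f := by
  induction l with
  | nil => rfl
  | cons x xs ih => simp [ih]

theorem pv_A_eq_map (s : String) :
    fn_hack_6 s =
      if s.toList.length = 0 then ["0"]
      else (List.range s.toList.length).map
        (fun (k : Nat) => if ((k : Int) + 1) % 2 ≠ 0 then PySem.Int.toStr ((k : Int) + 1) else "-") := by
  unfold fn_hack_6
  by_cases h : s.toList.length = 0
  · have hng : ¬ PySem.Str.len s > 0 := by simp [PySem.Str.len_eq, h]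
    rw [if_neg hng, if_pos h]
  · have hpos : (0 : Int) < (s.toList.length : Int) := by
      exact_mod_cast Nat.pos_of_ne_zero h
    rw [if_pos (by simpa [PySem.Str.len_eq] using hpos), if_neg h]
    have hbody : (fun (lst : List String) (index : Int) =>
        if PySem.Int.mod (index + 1) 2 ≠ 0 then lst ++ [PySem.Int.toStr (index + 1)]
        else lst ++ ["-"]) =
        (fun (lst : List String) (index : Int) =>
          lst ++ [if (index + 1) % 2 ≠ 0 then PySem.Int.toStr (index + 1) else "-"]) := by
      funext lst index
      have hm : PySem.Int.mod (index + 1) 2 = (index + 1) % 2 := by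
        simp [PySem.Int.mod, Int.fmod_eq_emod]
      rw [hm]
      split_ifs <;> rfl
    rw [hbody]
    rw [PySem.List.foldl_append_eq_flatMap
      (fun index => [if (index + 1) % 2 ≠ 0 then PySem.Int.toStr (index + 1) else "-"])]
    rw [PySem.Str.len_eq, PySem.List.pyRange_one]
    rw [List.nil_append, List.flatMap_map, pv_flatMap_singleton_map]
    have hr : ((s.toList.length : Int) - 0).toNat = s.toList.length := by omega
    rw [hr]
    apply List.map_congr_left
    intro a _
    norm_num

theorem fn_hack_6_spec_aux (s : String) : fn_hack_6 s = fn_hack_6_alt s := by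
  rw [pv_A_eq_map]
  unfold fn_hack_6_alt
  by_cases h : s.toList.length = 0
  · rw [if_pos h, if_pos (by simp [PySem.Str.len_eq, h])]
  · have hlen0 : ¬ PySem.Str.len s = 0 := by
      rw [PySem.Str.len_eq]
      exact_mod_cast h
    rw [if_neg h, if_neg hlen0]
    set n := s.toList.length with hn
    have hpos : 0 < n := Nat.pos_of_ne_zero h
    rw [PySem.Str.len_eq, ← hn, PySem.List.pyRange_of_pos 0 (n : Int) (by norm_num)]
    rw [if_pos (by exact_mod_cast hpos)]
    set m := ((((n : Int)) - 0 + 2 - 1) / 2).toNat with hmdef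
    have hm : m = (n + 1) / 2 := by omega
    rw [List.foldl_map]
    set g : Nat → String := fun j => PySem.Int.toStr ((j : Int) + 1) with hg
    have hbody : (fun (res : List String) (k : Nat) =>
        PySem.List.pySetD res (0 + 2 * (k : Int)) (PySem.Int.toStr (0 + 2 * (k : Int) + 1))) =
        (fun (res : List String) (k : Nat) => res.set (2 * k) (g (2 * k))) := by
      funext res k
      have h1 : (0 + 2 * (k : Int)) = ((2 * k : Nat) : Int) := by push_cast; ring
      rw [h1, PySem.List.pySetD_natCast, hg]
    rw [hbody]
    have hfold : ∀ (init : List String),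
        List.foldl (fun (res : List String) (k : Nat) => res.set (2 * k) (g (2 * k))) init
          (List.range m) =
        List.foldl (fun (res : List String) (k : Nat) => res.set k (g k)) init
          ((List.range m).map (fun k => 2 * k)) := by
      intro init
      rw [List.foldl_map]
    rw [hfold]
    apply List.ext_getElem?
    intro j
    rw [pv_foldl_set_getElem? g]
    have hinit : (PySem.List.pyRepeat ["-"] (n : Int)) = List.replicate n "-" := by
      rw [PySem.List.pyRepeat_singleton]
      norm_num
    rw [hinit]
    simp only [List.length_replicate, List.getElem?_map,
      List.getElem?_replicate, List.mem_map, List.mem_range, hg]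
    by_cases hj : j < n
    · by_cases he : j % 2 = 0
      · have hmem : ∃ x, x < m ∧ 2 * x = j := ⟨j / 2, by omega, by omega⟩
        rw [if_pos hmem, if_pos hj, List.getElem?_range hj]
        have hcond : ((j : Int) + 1) % 2 ≠ 0 := by omega
        simp [hcond]
      · have hmem : ¬ ∃ x, x < m ∧ 2 * x = j := by
          rintro ⟨x, hx, rfl⟩
          omega
        rw [if_neg hmem, List.getElem?_range hj]
        have hcond : ¬ (((j : Int) + 1) % 2 ≠ 0) := by omega
        simp [hj]
        intro hx
        omega
    · have hmem : ¬ ∃ x, x < m ∧ 2 * x = j := by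
        rintro ⟨x, hx, rfl⟩
        omega
      rw [if_neg hmem]
      simp [hj]

-- ===== VERDICT (by name: the statement is the Claim_ definition above) =====
theorem fn_hack_6_spec : Claim_equal_fn_hack_6 := by
  intro s _
  unfold Spec_fn_hack_6
  exact fn_hack_6_spec_aux s
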